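-- pv_equiv track=rewrite | github.com/minorthreat85/PitBox-Replit | pitbox_extracted/pitbox/agent/utils/cmpreset.py | _normalize_flat
-- ===== SOURCE A (Python) =====
-- from typing import Any
--
-- CMPRESET_TO_ASSISTS = {
--     "IdealLine": "IDEAL_LINE",
--     "AutoBlip": "AUTO_BLIP",
--     "StabilityControl": "STABILITY_CONTROL",
--     "AutoBrake": "AUTO_BRAKE",
--     "AutoShifter": "AUTO_SHIFTER",
--     "Abs": "ABS",
--     "TractionControl": "TRACTION_CONTROL",
--     "AutoClutch": "AUTO_CLUTCH",
--     "VisualDamage": "VISUALDAMAGE",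
--     "Damage": "DAMAGE",
--     "FuelConsumption": "FUEL_RATE",
--     "TyreWear": "TYRE_WEAR",
--     "TyreBlankets": "TYRE_BLANKETS",
--     "SlipSteam": "SLIPSTREAM",
-- }
--
-- def _normalize_flat(flat: dict) -> dict[str, Any]:
--     """
--     Normalize flat preset to our PascalCase keys; case-insensitive match.
--     Only includes keys that exist in the preset (no defaults). Preserves value types.
--     """
--     result: dict[str, Any] = {}
--     flat_lower = {k.lower(): (k, v) for k, v in flat.items() if isinstance(k, str)}
--     for our_key in CMPRESET_TO_ASSISTS:
--         if our_key.lower() not in flat_lower: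
--             continue
--         _, val = flat_lower[our_key.lower()]
--         result[our_key] = val
--     return result
-- ===== SOURCE B (Python) =====
-- from typing import Any
--
-- CMPRESET_TO_ASSISTS = {
--     "IdealLine": "IDEAL_LINE",
--     "AutoBlip": "AUTO_BLIP",
--     "StabilityControl": "STABILITY_CONTROL",
--     "AutoBrake": "AUTO_BRAKE",
--     "AutoShifter": "AUTO_SHIFTER",
--     "Abs": "ABS",
--     "TractionControl": "TRACTION_CONTROL",
--     "AutoClutch": "AUTO_CLUTCH",
--     "VisualDamage": "VISUALDAMAGE",
--     "Damage": "DAMAGE",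
--     "FuelConsumption": "FUEL_RATE",
--     "TyreWear": "TYRE_WEAR",
--     "TyreBlankets": "TYRE_BLANKETS",
--     "SlipSteam": "SLIPSTREAM",
-- }
--
-- _LOWER_TO_CANON = {k.lower(): k for k in CMPRESET_TO_ASSISTS}
--
-- def _normalize_flat(flat: dict) -> dict[str, Any]:
--     matched: dict[str, Any] = {}
--     for k, v in flat.items():
--         if isinstance(k, str):
--             canon = _LOWER_TO_CANON.get(k.lower())
--             if canon is not None:
--                 matched[canon] = v
--     return {key: matched[key] for key in CMPRESET_TO_ASSISTS if key in matched}
-- ===== Notes on version B (the rewrite author's own statement) =====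
-- stated objective: alternative
-- what changed: Instead of lowercasing and indexing the whole input and then probing it per table key, B precomputes a fixed lowercase->canonical lookup for the table and makes one pass over the input keys, collecting matches keyed by canonical name, then emits them in table order.
import Mathlib
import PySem

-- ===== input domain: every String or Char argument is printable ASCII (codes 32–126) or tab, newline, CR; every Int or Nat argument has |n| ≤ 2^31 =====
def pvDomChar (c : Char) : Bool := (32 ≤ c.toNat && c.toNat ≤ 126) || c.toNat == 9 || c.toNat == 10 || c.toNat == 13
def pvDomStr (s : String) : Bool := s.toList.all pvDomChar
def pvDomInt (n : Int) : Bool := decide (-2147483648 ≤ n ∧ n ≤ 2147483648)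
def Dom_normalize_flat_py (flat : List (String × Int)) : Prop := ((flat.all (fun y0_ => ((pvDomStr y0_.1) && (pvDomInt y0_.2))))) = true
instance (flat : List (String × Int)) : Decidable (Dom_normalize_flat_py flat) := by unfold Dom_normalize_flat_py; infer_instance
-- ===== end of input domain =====

-- B replaces A's lowercased copy of the input (probed once per table key) by a fixed
-- lowercase->canonical table probed once per input key; same cost, different traversal
-- (objective: alternative). All Lean dict keys are String, so A's isinstance(k, str)
-- guard is always true and is not ported.

-- ===== PORT A =====
-- the module constant CMPRESET_TO_ASSISTS (values are never read by _normalize_flat)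
def cmpresetToAssists : PySem.Dict String String := PySem.Dict.ofList
  [("IdealLine", "IDEAL_LINE"), ("AutoBlip", "AUTO_BLIP"),
   ("StabilityControl", "STABILITY_CONTROL"), ("AutoBrake", "AUTO_BRAKE"),
   ("AutoShifter", "AUTO_SHIFTER"), ("Abs", "ABS"),
   ("TractionControl", "TRACTION_CONTROL"), ("AutoClutch", "AUTO_CLUTCH"),
   ("VisualDamage", "VISUALDAMAGE"), ("Damage", "DAMAGE"),
   ("FuelConsumption", "FUEL_RATE"), ("TyreWear", "TYRE_WEAR"),
   ("TyreBlankets", "TYRE_BLANKETS"), ("SlipSteam", "SLIPSTREAM")]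

def normalize_flat_py (flat : List (String × Int)) : List (String × Int) :=
  -- flat_lower = {k.lower(): (k, v) for k, v in flat.items()}
  let flat_lower : PySem.Dict String (String × Int) :=
    flat.foldl (fun d kv => d.insert (PySem.Str.lower kv.1) (kv.1, kv.2)) PySem.Dict.empty
  -- for our_key in CMPRESET_TO_ASSISTS: skip if our_key.lower() not in flat_lower
  let result : PySem.Dict String Int :=
    cmpresetToAssists.keys.foldl (fun res our_key =>
      match flat_lower.get? (PySem.Str.lower our_key) with
      | none => res
      | some pv => res.insert our_key pv.2) PySem.Dict.empty
  result.items

-- ===== PORT B =====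
-- _LOWER_TO_CANON = {k.lower(): k for k in CMPRESET_TO_ASSISTS}
def lowerToCanon : PySem.Dict String String :=
  cmpresetToAssists.keys.foldl (fun d k => d.insert (PySem.Str.lower k) k) PySem.Dict.empty

def normalize_flat_py_alt (flat : List (String × Int)) : List (String × Int) :=
  -- one pass over flat: canon = _LOWER_TO_CANON.get(k.lower()); matched[canon] = v
  let matched : PySem.Dict String Int :=
    flat.foldl (fun m kv =>
      match lowerToCanon.get? (PySem.Str.lower kv.1) with
      | none => m
      | some canon => m.insert canon kv.2) PySem.Dict.empty
  -- {key: matched[key] for key in CMPRESET_TO_ASSISTS if key in matched}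
  (cmpresetToAssists.keys.foldl (fun res key =>
    match matched.get? key with
    | none => res
    | some v => res.insert key v) PySem.Dict.empty).items

-- ===== PRECONDITION & SPEC =====
def Spec_normalize_flat_py (flat : List (String × Int)) (out : List (String × Int)) : Prop := out = normalize_flat_py_alt flat
instance (flat : List (String × Int)) (out : List (String × Int)) : Decidable (Spec_normalize_flat_py flat out) := by unfold Spec_normalize_flat_py; infer_instance

-- ===== CLAIM (what is proved, stated in full; the proofs are below) =====
def Claim_equal_normalize_flat_py : Prop := ∀ (flat : List (String × Int)), Dom_normalize_flat_py flat → Spec_normalize_flat_py flat (normalize_flat_py flat)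

-- ===== LEMMAS AND PROOFS =====

-- every canonical table key looks itself up in lowerToCanon via its lowercase
theorem lowerToCanon_get_lower (c : String) (hc : c ∈ cmpresetToAssists.keys) :
    lowerToCanon.get? (PySem.Str.lower c) = some c := by
  fin_cases hc <;> decide

-- a successful lookup in an assoc list whose keys are the lowercases of its values
-- returns a key whose lowercase is the probe
theorem get_some_lower (l : List (String × String))
    (hw : ∀ p ∈ l, PySem.Str.lower p.2 = p.1) (s c : String)
    (h : (PySem.Dict.mk l).get? s = some c) : PySem.Str.lower c = s := by
  induction l with
  | nil => simp [PySem.Dict.get?] at h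
  | cons p rest ih =>
    obtain ⟨k, v⟩ := p
    rw [PySem.Dict.get?_mk_cons] at h
    by_cases hk : (k == s) = true
    · rw [if_pos hk] at h
      injection h with h2
      subst h2
      rw [← beq_iff_eq.mp hk]
      exact hw (k, v) (List.mem_cons_self)
    · rw [if_neg hk] at h
      exact ih (fun p hp => hw p (List.mem_cons_of_mem _ hp)) h

-- a successful lowerToCanon lookup at s means s is the lowercase of the returned key
theorem lowerToCanon_get_some (s c : String) (h : lowerToCanon.get? s = some c) :
    PySem.Str.lower c = s := by
  have hl : lowerToCanon = PySem.Dict.mk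
      [("idealline", "IdealLine"), ("autoblip", "AutoBlip"),
       ("stabilitycontrol", "StabilityControl"), ("autobrake", "AutoBrake"),
       ("autoshifter", "AutoShifter"), ("abs", "Abs"),
       ("tractioncontrol", "TractionControl"), ("autoclutch", "AutoClutch"),
       ("visualdamage", "VisualDamage"), ("damage", "Damage"),
       ("fuelconsumption", "FuelConsumption"), ("tyrewear", "TyreWear"),
       ("tyreblankets", "TyreBlankets"), ("slipsteam", "SlipSteam")] := by decide
  rw [hl] at h
  exact get_some_lower _ (by decide) s c h

-- the one-pass invariant: after folding any prefix of flat, B's matched dict agrees,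
-- on every canonical table key c, with A's flat_lower probed at c.lower()
theorem loop_inv (flat : List (String × Int))
    (fl : PySem.Dict String (String × Int)) (m : PySem.Dict String Int)
    (hinv : ∀ c ∈ cmpresetToAssists.keys,
      m.get? c = (fl.get? (PySem.Str.lower c)).map Prod.snd) :
    ∀ c ∈ cmpresetToAssists.keys,
      (flat.foldl (fun m kv =>
        match lowerToCanon.get? (PySem.Str.lower kv.1) with
        | none => m
        | some canon => m.insert canon kv.2) m).get? c
      = ((flat.foldl (fun d kv => d.insert (PySem.Str.lower kv.1) (kv.1, kv.2)) fl).get?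
          (PySem.Str.lower c)).map Prod.snd := by
  induction flat generalizing fl m with
  | nil => exact hinv
  | cons kv rest ih =>
    simp only [List.foldl_cons]
    apply ih
    intro c hc
    by_cases hlc : PySem.Str.lower c = PySem.Str.lower kv.1
    · rw [hlc, PySem.Dict.get?_insert_self]
      have : lowerToCanon.get? (PySem.Str.lower kv.1) = some c := by
        rw [← hlc]; exact lowerToCanon_get_lower c hc
      rw [this]
      simp [PySem.Dict.get?_insert_self]
    · rw [PySem.Dict.get?_insert_of_ne _ _ hlc]
      cases h0 : lowerToCanon.get? (PySem.Str.lower kv.1) with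
      | none => exact hinv c hc
      | some c0 =>
        have hc0 : PySem.Str.lower c0 = PySem.Str.lower kv.1 := lowerToCanon_get_some _ _ h0
        have hne : c ≠ c0 := fun he => hlc (by rw [he, hc0])
        rw [PySem.Dict.get?_insert_of_ne _ _ hne]
        exact hinv c hc

-- the output pass: if the two dicts agree on every key of ks, the two emit-loops coincide
theorem out_eq (fl : PySem.Dict String (String × Int)) (m : PySem.Dict String Int)
    (ks : List String)
    (h : ∀ c ∈ ks, m.get? c = (fl.get? (PySem.Str.lower c)).map Prod.snd)
    (res : PySem.Dict String Int) :
    ks.foldl (fun res our_key =>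
      match fl.get? (PySem.Str.lower our_key) with
      | none => res
      | some pv => res.insert our_key pv.2) res
    = ks.foldl (fun res key =>
      match m.get? key with
      | none => res
      | some v => res.insert key v) res := by
  induction ks generalizing res with
  | nil => rfl
  | cons c rest ih =>
    have hc := h c (List.mem_cons_self)
    simp only [List.foldl_cons]
    cases hfl : fl.get? (PySem.Str.lower c) with
    | none => rw [hfl] at hc; simp only [Option.map_none] at hc; rw [hc]
              exact ih (fun c h' => h c (List.mem_cons_of_mem _ h')) res
    | some pv => rw [hfl] at hc; simp only [Option.map_some] at hc; rw [hc]
                 exact ih (fun c h' => h c (List.mem_cons_of_mem _ h')) _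

-- ===== VERDICT (by name: the statement is the Claim_ definition above) =====
theorem normalize_flat_py_spec : Claim_equal_normalize_flat_py := by
  intro flat _
  unfold Spec_normalize_flat_py normalize_flat_py normalize_flat_py_alt
  exact congrArg PySem.Dict.items
    (out_eq _ _ _
      (loop_inv flat PySem.Dict.empty PySem.Dict.empty
        (by intro c _; simp [PySem.Dict.get?_empty]))
      PySem.Dict.empty)
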